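-- pv_equiv track=rewrite | github.com/HiImYong99/Algolithm | 프로그래머스/lv0/120842. 2차원으로 만들기/2차원으로 만들기.py | solution
-- ===== SOURCE A (Python) =====
-- def solution(num_list, n):
--     answer = []
--     temp = []
--     for a in num_list:
--         temp.append(a)
--         if len(temp) == n:
--             answer.append(temp)
--             temp = []
--     return answer
-- ===== SOURCE B (Python) =====
-- def solution(num_list, n):
--     if n <= 0:
--         return []
--     m = len(num_list) // n
--     return [num_list[i * n:(i + 1) * n] for i in range(m)]
-- ===== Notes on version B (the rewrite author's own statement) =====
-- stated objective: idiomatic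
-- what changed: Replaces the sequential append-and-flush buffer with direct strided slicing: compute the number of complete rows m = len//n and take the i-th window num_list[i*n:(i+1)*n] for each chunk index.
import Mathlib
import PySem

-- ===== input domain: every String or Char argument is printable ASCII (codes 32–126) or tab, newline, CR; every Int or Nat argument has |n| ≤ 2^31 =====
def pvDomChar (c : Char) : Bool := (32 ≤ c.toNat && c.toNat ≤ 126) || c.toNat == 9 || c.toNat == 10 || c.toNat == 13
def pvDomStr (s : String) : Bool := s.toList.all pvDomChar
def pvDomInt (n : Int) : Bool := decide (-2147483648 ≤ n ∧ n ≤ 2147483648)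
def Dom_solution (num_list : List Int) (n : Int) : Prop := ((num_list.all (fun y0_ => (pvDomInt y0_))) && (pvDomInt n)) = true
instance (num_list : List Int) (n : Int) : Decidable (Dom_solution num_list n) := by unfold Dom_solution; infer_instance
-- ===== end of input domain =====

-- B replaces A's sequential append-and-flush buffer with strided slicing by chunk index (idiomatic, same cost).

-- ===== PORT A =====
-- literal port of A: fold over the list carrying (answer, temp), flushing temp when it reaches length n
def solution (num_list : List Int) (n : Int) : List (List Int) :=
  (num_list.foldl
    (fun (s : List (List Int) × List Int) a =>
      let temp := s.2 ++ [a]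
      if (temp.length : Int) = n then (s.1 ++ [temp], ([] : List Int)) else (s.1, temp))
    (([] : List (List Int)), ([] : List Int))).1

-- ===== PORT B =====
-- literal port of B: m = len // n complete rows, row i is the slice num_list[i*n:(i+1)*n]
def solution_alt (num_list : List Int) (n : Int) : List (List Int) :=
  if n ≤ 0 then []
  else
    let m := PySem.Int.floordiv (num_list.length : Int) n
    (PySem.List.pyRange 0 m 1).map
      (fun i => PySem.List.slice num_list (some (i * n)) (some ((i + 1) * n)))

-- ===== PRECONDITION & SPEC =====
def Spec_solution (num_list : List Int) (n : Int) (out : List (List Int)) : Prop := out = solution_alt num_list n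
instance (num_list : List Int) (n : Int) (out : List (List Int)) : Decidable (Spec_solution num_list n out) := by unfold Spec_solution; infer_instance

-- ===== CLAIM (what is proved, stated in full; the proofs are below) =====
def Claim_equal_solution : Prop := ∀ (num_list : List Int) (n : Int), Dom_solution num_list n → Spec_solution num_list n (solution num_list n)

-- ===== LEMMAS AND PROOFS =====

-- abbreviation for A's loop body
def stepA (n : Int) (s : List (List Int) × List Int) (a : Int) : List (List Int) × List Int :=
  let temp := s.2 ++ [a]
  if (temp.length : Int) = n then (s.1 ++ [temp], ([] : List Int)) else (s.1, temp)

theorem solution_eq_foldl (l : List Int) (n : Int) :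
    solution l n = (l.foldl (stepA n) ([], [])).1 := rfl

-- when n ≤ 0 the flush condition never fires, so answer stays fixed
theorem foldl_nonpos (n : Int) (hn : n ≤ 0) :
    ∀ (l : List Int) (ans : List (List Int)) (temp : List Int),
      (l.foldl (stepA n) (ans, temp)).1 = ans := by
  intro l
  induction l with
  | nil => intro ans temp; rfl
  | cons a l ih =>
      intro ans temp
      simp only [List.foldl_cons, stepA]
      have : ¬ (((temp ++ [a]).length : Int) = n) := by
        simp only [List.length_append, List.length_cons, List.length_nil]
        omega
      simp only [this, if_false]
      exact ih ans (temp ++ [a])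

-- reference chunker: successive blocks of k elements, trailing partial block dropped
def chunks (k : Nat) (l : List Int) : List (List Int) :=
  if h : 0 < k ∧ k ≤ l.length then l.take k :: chunks k (l.drop k) else []
termination_by l.length
decreasing_by simp only [List.length_drop]; omega

theorem chunks_short (k : Nat) (l : List Int) (h : l.length < k) : chunks k l = [] := by
  rw [chunks, dif_neg (by omega)]

theorem chunks_long (k : Nat) (l : List Int) (hk : 0 < k) (h : k ≤ l.length) :
    chunks k l = l.take k :: chunks k (l.drop k) := by
  rw [chunks]; simp only [dif_pos (And.intro hk h)]

-- A's loop from state (ans, temp) with a short buffer computes ans ++ chunks of (temp ++ l)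
theorem foldl_chunks (n : Int) (k : Nat) (hk : 0 < k) (hkn : (k : Int) = n) :
    ∀ (l : List Int) (ans : List (List Int)) (temp : List Int), temp.length < k →
      (l.foldl (stepA n) (ans, temp)).1 = ans ++ chunks k (temp ++ l) := by
  intro l
  induction l with
  | nil =>
      intro ans temp ht
      simp only [List.foldl_nil, List.append_nil]
      rw [chunks_short k temp ht, List.append_nil]
  | cons a l ih =>
      intro ans temp ht
      simp only [List.foldl_cons, stepA]
      by_cases hc : (((temp ++ [a]).length : Int) = n)
      · simp only [hc, if_true]
        rw [ih (ans ++ [temp ++ [a]]) [] hk]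
        simp only [List.nil_append]
        have hlen : (temp ++ [a]).length = k := by
          have := hc; rw [← hkn] at this; exact_mod_cast this
        have hlist : temp ++ a :: l = (temp ++ [a]) ++ l := by simp
        have hle : k ≤ ((temp ++ [a]) ++ l).length := by
          rw [List.length_append, hlen]; omega
        rw [hlist, chunks_long k ((temp ++ [a]) ++ l) hk hle]
        have htake : ((temp ++ [a]) ++ l).take k = temp ++ [a] := by
          rw [List.take_append_of_le_length (by omega), List.take_of_length_le (by omega)]
        have hdrop : ((temp ++ [a]) ++ l).drop k = l := by
          rw [List.drop_append_of_le_length (by omega)]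
          simp [hlen]
        rw [htake, hdrop]
        simp
      · simp only [hc, if_false]
        have ht' : (temp ++ [a]).length < k := by
          have hne : (temp ++ [a]).length ≠ k := by
            intro he; apply hc; rw [← hkn]; exact_mod_cast congrArg (Nat.cast : Nat → Int) he
          simp only [List.length_append, List.length_cons, List.length_nil] at *
          omega
        rw [ih ans (temp ++ [a]) ht']
        simp

-- chunks as a map over chunk indices
theorem chunks_eq_map (k : Nat) (hk : 0 < k) :
    ∀ l : List Int,
      chunks k l = (List.range (l.length / k)).map (fun i => (l.drop (i * k)).take k) := by
  intro l
  induction hl : l.length using Nat.strong_induction_on generalizing l with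
  | _ m ih =>
    subst hl
    by_cases h : l.length < k
    · rw [chunks_short k l h, Nat.div_eq_of_lt h]
      simp
    · push Not at h
      rw [chunks_long k l hk h]
      have hdl : (l.drop k).length = l.length - k := by simp
      have ihd := ih (l.drop k).length (by omega) (l.drop k) rfl
      rw [ihd]
      have hq : l.length / k = (l.drop k).length / k + 1 := by
        rw [hdl, ← Nat.div_eq_sub_div hk h]
      rw [hq, List.range_succ_eq_map]
      simp only [List.map_cons, List.map_map]
      congr 1
      · simp
      · apply List.map_congr_left
        intro i _
        simp only [Function.comp]
        rw [List.drop_drop]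
        congr 2
        rw [Nat.succ_eq_add_one]
        ring

theorem solution_alt_pos (l : List Int) (n : Int) (hn : 0 < n) :
    solution_alt l n = (List.range (l.length / n.toNat)).map
      (fun i => (l.drop (i * n.toNat)).take n.toNat) := by
  have hk : ((n.toNat : Int)) = n := Int.toNat_of_nonneg (le_of_lt hn)
  unfold solution_alt
  rw [if_neg (by omega)]
  show (PySem.List.pyRange 0 (PySem.Int.floordiv (l.length : Int) n) 1).map
      (fun i => PySem.List.slice l (some (i * n)) (some ((i + 1) * n))) = _
  have h0 : PySem.Int.floordiv ((l.length : Int)) n = ((l.length / n.toNat : Nat) : Int) := by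
    rw [← hk]; exact PySem.Int.floordiv_natCast _ _
  rw [h0, PySem.List.pyRange_zero_natCast, List.map_map]
  apply List.map_congr_left
  intro i _
  simp only [Function.comp]
  have h1 : ((i : Nat) : Int) * n = ((i * n.toNat : Nat) : Int) := by rw [← hk]; push_cast [Int.toNat_natCast]; ring
  have h2 : ((i : Nat) : Int) + 1 = (((i + 1 : Nat) : Nat) : Int) := by push_cast; ring
  have h3 : (((i + 1 : Nat) : Nat) : Int) * n = ((i * n.toNat : Nat) : Int) + ((n.toNat : Nat) : Int) := by
    rw [← hk]; push_cast [Int.toNat_natCast]; ring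
  rw [h1, h2, h3, PySem.List.slice_natCast_add]

-- ===== VERDICT (by name: the statement is the Claim_ definition above) =====
theorem solution_spec : Claim_equal_solution := by
  intro l n _
  unfold Spec_solution
  rw [solution_eq_foldl]
  by_cases hn : n ≤ 0
  · rw [foldl_nonpos n hn l [] []]
    unfold solution_alt
    rw [if_pos hn]
  · push Not at hn
    have hk : 0 < n.toNat := by omega
    have hkn : ((n.toNat : Int)) = n := Int.toNat_of_nonneg (le_of_lt hn)
    rw [foldl_chunks n n.toNat hk hkn l [] [] (by simp [hk])]
    simp only [List.nil_append]
    rw [solution_alt_pos l n hn, chunks_eq_map n.toNat hk l]
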